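-- pv_equiv track=rewrite | github.com/masinov/foreman | foreman/builtins.py | _waiver_type_for_proof_failure
-- ===== SOURCE A (Python) =====
-- def _waiver_type_for_proof_failure(failure_reasons: tuple[str, ...]) -> str | None:
--     """Determine the waiver type that could apply given failure reasons.
--
--     Returns a waiver type only if ALL failures are waiveable proof deficiencies
--     (missing/incomplete criteria). Never returns a waiver type if any failure
--     involves tests, score, reviewer, or security.
--     """
--     non_waivable_markers = (
--         "tests failed",
--         "exit code",
--         "evidence score too low",
--         "review",
--         "security",
--     )
--     reasons_lower = [r.lower() for r in failure_reasons]
--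
--     # If there are any non-waivable failures, no waiver can apply
--     for reason in reasons_lower:
--         if any(marker in reason for marker in non_waivable_markers):
--             return None
--
--     # All failures are proof-related — determine waiver type
--     if not reasons_lower:
--         return None
--
--     if all("no acceptance criteria" in r for r in reasons_lower):
--         return "missing_acceptance_criteria"
--
--     if all("criterion not fully addressed" in r for r in reasons_lower):
--         return "incomplete_criteria"
--
--     return None
-- ===== SOURCE B (Python) =====
-- _REASON_LABELS = (
--     ("tests failed", 4),
--     ("exit code", 4),
--     ("evidence score too low", 4),
--     ("review", 4),
--     ("security", 4),
--     ("no acceptance criteria", 1),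
--     ("criterion not fully addressed", 2),
-- )
--
-- _WAIVER_BY_MASK = {
--     3: "missing_acceptance_criteria",
--     1: "missing_acceptance_criteria",
--     2: "incomplete_criteria",
--     0: None,
-- }
--
--
-- def _reason_mask(reason):
--     r = reason.lower()
--     m = 0
--     for marker, bit in _REASON_LABELS:
--         if marker in r:
--             m |= bit
--     return m
--
--
-- def _waiver_type_for_proof_failure(failure_reasons):
--     """Classify each reason into a 3-bit mask (4 = non-waivable, 1 = missing
--     criteria, 2 = incomplete criteria), aggregate the masks with bitwise OR
--     and AND, and decide with a lookup table on the AND-mask."""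
--     masks = [_reason_mask(r) for r in failure_reasons]
--     if not masks:
--         return None
--     union = inter = masks[0]
--     for m in masks[1:]:
--         union |= m
--         inter &= m
--     if union & 4:
--         return None
--     return _WAIVER_BY_MASK[inter]
-- ===== Notes on version B (the rewrite author's own statement) =====
-- stated objective: alternative
-- what changed: Replaces A's three staged substring scans with a map-reduce over 3-bit masks: each reason is classified once into a bitmask via a marker table, the masks are aggregated with bitwise OR (non-waivable anywhere) and AND (marker holds everywhere), and the verdict is read from a lookup table keyed by the AND-mask.
import Mathlib
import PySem

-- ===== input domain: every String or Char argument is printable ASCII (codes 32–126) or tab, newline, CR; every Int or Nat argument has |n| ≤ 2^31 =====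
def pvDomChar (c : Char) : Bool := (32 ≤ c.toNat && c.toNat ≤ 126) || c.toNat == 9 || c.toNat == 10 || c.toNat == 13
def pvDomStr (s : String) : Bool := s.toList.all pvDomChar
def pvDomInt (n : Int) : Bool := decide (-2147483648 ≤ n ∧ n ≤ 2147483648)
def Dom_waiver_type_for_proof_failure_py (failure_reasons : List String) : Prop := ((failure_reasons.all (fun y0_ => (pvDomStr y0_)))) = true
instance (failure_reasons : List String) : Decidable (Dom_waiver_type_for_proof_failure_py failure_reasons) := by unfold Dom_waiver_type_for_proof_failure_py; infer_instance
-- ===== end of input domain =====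

-- B replaces A's three staged substring scans by a map-reduce over 3-bit masks (classify each reason once, aggregate with bitwise OR/AND, decide by table lookup); objective: alternative.


-- ===== PORT A =====
def pvMarkers : List String :=
  ["tests failed", "exit code", "evidence score too low", "review", "security"]

def waiver_type_for_proof_failure_py (failure_reasons : List String) : Option String :=
  let reasons_lower := failure_reasons.map PySem.Str.lower
  -- for reason in reasons_lower: if any(marker in reason …): return None
  if reasons_lower.any (fun reason => pvMarkers.any (fun m => PySem.Str.isIn m reason)) then none
  else if reasons_lower.isEmpty then none
  else if reasons_lower.all (fun r => PySem.Str.isIn "no acceptance criteria" r) then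
    some "missing_acceptance_criteria"
  else if reasons_lower.all (fun r => PySem.Str.isIn "criterion not fully addressed" r) then
    some "incomplete_criteria"
  else none

-- ===== PORT B =====
-- Source B's marker → bit table and verdict table
def pvLabels : List (String × Nat) :=
  [("tests failed", 4), ("exit code", 4), ("evidence score too low", 4),
   ("review", 4), ("security", 4),
   ("no acceptance criteria", 1), ("criterion not fully addressed", 2)]

def pvWaiverByMask : PySem.Dict Nat (Option String) :=
  PySem.Dict.ofList
    [(3, some "missing_acceptance_criteria"), (1, some "missing_acceptance_criteria"),
     (2, some "incomplete_criteria"), (0, none)]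

-- _reason_mask: classify one reason into a 3-bit mask
def pvReasonMask (reason : String) : Nat :=
  let r := PySem.Str.lower reason
  pvLabels.foldl (fun m p => if PySem.Str.isIn p.1 r then m ||| p.2 else m) 0

def waiver_type_for_proof_failure_py_alt (failure_reasons : List String) : Option String :=
  let masks := failure_reasons.map pvReasonMask
  match masks with
  | [] => none
  | m0 :: tl =>
    let p := tl.foldl (fun (p : Nat × Nat) m => (p.1 ||| m, p.2 &&& m)) (m0, m0)
    if p.1 &&& 4 ≠ 0 then none
    -- _WAIVER_BY_MASK[inter]: when this line is reached no mask has bit 4, so inter ∈ {0,1,2,3}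
    -- and the key is always present (Python's KeyError case is unreachable); getD is exact here
    else pvWaiverByMask.getD p.2 none

-- ===== PRECONDITION & SPEC =====
def Spec_waiver_type_for_proof_failure_py (failure_reasons : List String) (out : Option String) : Prop := out = waiver_type_for_proof_failure_py_alt failure_reasons
instance (failure_reasons : List String) (out : Option String) : Decidable (Spec_waiver_type_for_proof_failure_py failure_reasons out) := by unfold Spec_waiver_type_for_proof_failure_py; infer_instance

-- ===== CLAIM (what is proved, stated in full; the proofs are below) =====
def Claim_equal_waiver_type_for_proof_failure_py : Prop := ∀ (failure_reasons : List String), Dom_waiver_type_for_proof_failure_py failure_reasons → Spec_waiver_type_for_proof_failure_py failure_reasons (waiver_type_for_proof_failure_py failure_reasons)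

-- ===== LEMMAS AND PROOFS =====

-- A's three per-reason conditions, as Bool predicates on the original string
def blockedB (r : String) : Bool := pvMarkers.any (fun m => PySem.Str.isIn m (PySem.Str.lower r))
def missB (r : String) : Bool := PySem.Str.isIn "no acceptance criteria" (PySem.Str.lower r)
def incB (r : String) : Bool := PySem.Str.isIn "criterion not fully addressed" (PySem.Str.lower r)

-- the mask of a reason is the sum of its three label bits
theorem mask_char (r : String) :
    pvReasonMask r = (if missB r then 1 else 0) + (if incB r then 2 else 0) +
      (if blockedB r then 4 else 0) := by
  unfold pvReasonMask pvLabels blockedB pvMarkers missB incB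
  simp only [List.foldl, List.any_cons, List.any_nil]
  by_cases h1 : PySem.Str.isIn "tests failed" (PySem.Str.lower r) = true <;>
  by_cases h2 : PySem.Str.isIn "exit code" (PySem.Str.lower r) = true <;>
  by_cases h3 : PySem.Str.isIn "evidence score too low" (PySem.Str.lower r) = true <;>
  by_cases h4 : PySem.Str.isIn "review" (PySem.Str.lower r) = true <;>
  by_cases h5 : PySem.Str.isIn "security" (PySem.Str.lower r) = true <;>
  by_cases h6 : PySem.Str.isIn "no acceptance criteria" (PySem.Str.lower r) = true <;>
  by_cases h7 : PySem.Str.isIn "criterion not fully addressed" (PySem.Str.lower r) = true <;>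
  simp only [h1, h2, h3, h4, h5, h6, h7, reduceIte] <;> decide

theorem mask_and1 (r : String) : pvReasonMask r &&& 1 = if missB r then 1 else 0 := by
  rw [mask_char]; cases missB r <;> cases incB r <;> cases blockedB r <;> simp

theorem mask_and2 (r : String) : pvReasonMask r &&& 2 = if incB r then 2 else 0 := by
  rw [mask_char]; cases missB r <;> cases incB r <;> cases blockedB r <;> simp

theorem mask_and4 (r : String) : pvReasonMask r &&& 4 = if blockedB r then 4 else 0 := by
  rw [mask_char]; cases missB r <;> cases incB r <;> cases blockedB r <;> simp

theorem mask_le7 (r : String) : pvReasonMask r ≤ 7 := by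
  rw [mask_char]; cases missB r <;> cases incB r <;> cases blockedB r <;> simp

theorem and4_cases (u : Nat) : u &&& 4 = 0 ∨ u &&& 4 = 4 := by
  have h := Nat.and_two_pow u 2
  norm_num at h
  cases hb : u.testBit 2 <;> rw [hb] at h <;> simp at h <;> omega

-- the pair fold of Source B computes the componentwise folds
theorem fold_fst (tl : List Nat) (u i : Nat) :
    (tl.foldl (fun (p : Nat × Nat) m => (p.1 ||| m, p.2 &&& m)) (u, i)).1 =
      tl.foldl (fun a m => a ||| m) u := by
  induction tl generalizing u i with
  | nil => rfl
  | cons m tl ih => simpa using ih (u ||| m) (i &&& m)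

theorem fold_snd (tl : List Nat) (u i : Nat) :
    (tl.foldl (fun (p : Nat × Nat) m => (p.1 ||| m, p.2 &&& m)) (u, i)).2 =
      tl.foldl (fun a m => a &&& m) i := by
  induction tl generalizing u i with
  | nil => rfl
  | cons m tl ih => simpa using ih (u ||| m) (i &&& m)

-- bit 2 of the OR-fold records whether any reason is blocked
theorem fold_or4 (tl : List String) (u : Nat) :
    (tl.foldl (fun a r => a ||| pvReasonMask r) u) &&& 4 =
      if tl.any blockedB then 4 else u &&& 4 := by
  induction tl generalizing u with
  | nil => simp
  | cons r tl ih =>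
    simp only [List.foldl_cons, List.any_cons]
    rw [ih]
    by_cases hb : blockedB r = true <;> by_cases ha : tl.any blockedB = true <;>
      simp [Nat.and_or_distrib_right, mask_and4, hb, ha] <;>
      rcases and4_cases u with h | h <;> simp [h]

-- a single bit of the AND-fold records whether the selector holds everywhere
theorem fold_and_bit (c : Nat) (sel : String → Bool)
    (hc : ∀ r, pvReasonMask r &&& c = if sel r then c else 0) (tl : List String) (i : Nat) :
    (tl.foldl (fun a r => a &&& pvReasonMask r) i) &&& c =
      if tl.all sel then i &&& c else 0 := by
  induction tl generalizing i with
  | nil => simp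
  | cons r tl ih =>
    simp only [List.foldl_cons, List.all_cons]
    rw [ih]
    have h : i &&& pvReasonMask r &&& c = if sel r then i &&& c else 0 := by
      rw [Nat.and_assoc, hc r]
      by_cases hs : sel r = true <;> simp [hs]
    by_cases hs : sel r = true <;> by_cases ha : tl.all sel = true <;> simp [h, hs, ha]

theorem fold_and_le (tl : List String) (i : Nat) :
    tl.foldl (fun a r => a &&& pvReasonMask r) i ≤ i := by
  induction tl generalizing i with
  | nil => simp
  | cons r tl ih => exact le_trans (ih (i &&& pvReasonMask r)) (Nat.and_le_left)

theorem inter_val (n : Nat) (h7 : n ≤ 7) (h4 : n &&& 4 = 0) :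
    n = (n &&& 1) + (n &&& 2) := by
  interval_cases n <;> simp_all

-- ===== VERDICT (by name: the statement is the Claim_ definition above) =====
theorem waiver_type_for_proof_failure_py_spec : Claim_equal_waiver_type_for_proof_failure_py := by
  intro fr _
  unfold Spec_waiver_type_for_proof_failure_py
  cases fr with
  | nil => rfl
  | cons r0 rest =>
    have hA : waiver_type_for_proof_failure_py (r0 :: rest) =
        (if (r0 :: rest).any blockedB then none
         else if (r0 :: rest).all missB then some "missing_acceptance_criteria"
         else if (r0 :: rest).all incB then some "incomplete_criteria"
         else none) := by
      simp [waiver_type_for_proof_failure_py, blockedB, missB, incB, List.any_map,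
        List.all_map, Function.comp]
    have hU : (((rest.map pvReasonMask).foldl
        (fun (p : Nat × Nat) m => (p.1 ||| m, p.2 &&& m)) (pvReasonMask r0, pvReasonMask r0)).1) &&& 4
        = if (r0 :: rest).any blockedB then 4 else 0 := by
      rw [fold_fst, List.foldl_map, fold_or4, mask_and4]
      simp only [List.any_cons]
      by_cases hb : blockedB r0 = true <;> by_cases ha : rest.any blockedB = true <;> simp [hb, ha]
    have hIdef : ((rest.map pvReasonMask).foldl
        (fun (p : Nat × Nat) m => (p.1 ||| m, p.2 &&& m)) (pvReasonMask r0, pvReasonMask r0)).2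
        = rest.foldl (fun a r => a &&& pvReasonMask r) (pvReasonMask r0) := by
      rw [fold_snd, List.foldl_map]
    by_cases hAny : (r0 :: rest).any blockedB = true
    · rw [hA]
      simp only [hAny, if_true]
      simp only [waiver_type_for_proof_failure_py_alt, List.map_cons]
      rw [if_pos]
      rw [hU, hAny]; simp
    · have hAny' : (r0 :: rest).any blockedB = false := by simp_all
      set inter := rest.foldl (fun a r => a &&& pvReasonMask r) (pvReasonMask r0) with hi
      have hb0 : blockedB r0 = false := by simp [List.any_cons] at hAny'; exact hAny'.1
      have h1 : inter &&& 1 = if (r0 :: rest).all missB then 1 else 0 := by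
        rw [hi, fold_and_bit 1 missB mask_and1, mask_and1]
        simp only [List.all_cons]
        by_cases hm : missB r0 = true <;> by_cases ha : rest.all missB = true <;> simp [hm, ha]
      have h2 : inter &&& 2 = if (r0 :: rest).all incB then 2 else 0 := by
        rw [hi, fold_and_bit 2 incB mask_and2, mask_and2]
        simp only [List.all_cons]
        by_cases hm : incB r0 = true <;> by_cases ha : rest.all incB = true <;> simp [hm, ha]
      have h4 : inter &&& 4 = 0 := by
        rw [hi, fold_and_bit 4 blockedB mask_and4, mask_and4, hb0]
        simp
      have h7 : inter ≤ 7 := le_trans (fold_and_le rest _) (mask_le7 r0)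
      have hval : inter = (inter &&& 1) + (inter &&& 2) := inter_val inter h7 h4
      rw [hA]
      simp only [hAny', Bool.false_eq_true, if_false]
      simp only [waiver_type_for_proof_failure_py_alt, List.map_cons]
      have hUne : ¬(((rest.map pvReasonMask).foldl
          (fun (p : Nat × Nat) m => (p.1 ||| m, p.2 &&& m)) (pvReasonMask r0, pvReasonMask r0)).1 &&& 4 ≠ 0) := by
        rw [hU, hAny']; simp
      rw [if_neg hUne, hIdef]
      rw [h1, h2] at hval
      by_cases hM : (r0 :: rest).all missB = true <;>
        by_cases hI : (r0 :: rest).all incB = true <;>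
          simp only [hM, hI, reduceIte] at hval ⊢ <;> rw [hval] <;> decide
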